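-- pv_equiv track=rewrite | github.com/igpp-ucla/MagPy4 | MagPy4/ASCII_Importer.py | guessColumns
-- ===== SOURCE A (Python) =====
-- def guessColumns(header, firstLine):
--     # TODO: Adjust ending for left-aligned headers
--     leftAligned = True
--     splitHeader = header.split(' ')
--     if splitHeader[0] == '':
--         leftAligned = False
--
--     cols = [0]
--     colIndex = 0 # Character index in line
--     itemIndex = 0 # Item index for items in split string list
--     while itemIndex < len(splitHeader):
--         if len(splitHeader[itemIndex]) > 0: # Look for non-empty strings
--             if not leftAligned:
--                 cols.append(colIndex+len(splitHeader[itemIndex])+1)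
--             else:
--                 if colIndex != 0:
--                     cols.append(colIndex)
--             colIndex += len(splitHeader[itemIndex])
--         colIndex += 1
--         itemIndex += 1
--
--     return cols
-- ===== SOURCE B (Python) =====
-- def guessColumns(header, firstLine):
--     # Single character scan over the header locating non-space runs directly,
--     # instead of tracking a running index over split(' ') tokens.
--     leftAligned = header[:1] not in ('', ' ')
--     cols = [0]
--     i = 0
--     n = len(header)
--     while i < n:
--         if header[i] == ' ':
--             i += 1
--         else:
--             start = i
--             while i < n and header[i] != ' ':
--                 i += 1
--             if leftAligned:
--                 if start != 0:
--                     cols.append(start)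
--             else:
--                 cols.append(i + 1)
--     return cols
-- ===== Notes on version B (the rewrite author's own statement) =====
-- stated objective: idiomatic
-- what changed: B scans the header once, locating each non-space run's start and end indices directly, instead of splitting on ' ' and reconstructing character positions from token lengths with a running counter.
import Mathlib
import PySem

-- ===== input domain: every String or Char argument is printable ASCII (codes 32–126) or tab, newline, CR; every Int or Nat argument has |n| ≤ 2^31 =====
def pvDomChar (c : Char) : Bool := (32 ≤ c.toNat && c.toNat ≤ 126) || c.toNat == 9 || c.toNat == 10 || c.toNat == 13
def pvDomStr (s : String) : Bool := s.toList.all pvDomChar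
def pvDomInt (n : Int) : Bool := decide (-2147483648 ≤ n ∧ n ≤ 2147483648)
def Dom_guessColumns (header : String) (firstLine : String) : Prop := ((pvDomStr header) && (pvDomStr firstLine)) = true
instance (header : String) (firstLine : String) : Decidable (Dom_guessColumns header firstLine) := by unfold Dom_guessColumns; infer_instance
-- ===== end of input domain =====

-- B replaces A's split(' ')-and-count reconstruction by one direct character scan over the header (idiomatic decomposition, same O(n) cost); firstLine is unused by both.

-- ===== PORT A =====
-- the while loop over the split(' ') tokens, carrying colIndex (running character index) and the cols accumulator
def gcLoopA : List (List Char) → Bool → Int → List Int → List Int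
  | [], _, _, cols => cols
  | s :: rest, leftAligned, colIndex, cols =>
    if 0 < s.length then
      let cols' :=
        if !leftAligned then cols ++ [colIndex + (s.length : Int) + 1]
        else if colIndex ≠ 0 then cols ++ [colIndex] else cols
      gcLoopA rest leftAligned (colIndex + (s.length : Int) + 1) cols'
    else gcLoopA rest leftAligned (colIndex + 1) cols

def guessColumns (header : String) (firstLine : String) : List Int :=
  let splitHeader := PySem.Chars.splitOn header.toList [' ']   -- header.split(' ')
  let leftAligned := !(PySem.List.pyGetD splitHeader 0 [] == ([] : List Char))   -- True, set False if splitHeader[0] == ''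
  gcLoopA splitHeader leftAligned 0 [0]

-- ===== PORT B =====
-- inner while loop: consume a run of non-space characters, return the remaining suffix and the index after the run
def gcRun : List Char → Int → List Char × Int
  | [], i => ([], i)
  | c :: cs, i => if c = ' ' then (c :: cs, i) else gcRun cs (i + 1)

-- needed by gcScan's decreasing_by
theorem gcRun_fst_length : ∀ (cs : List Char) (i : Int), (gcRun cs i).1.length ≤ cs.length := by
  intro cs
  induction cs with
  | nil => intro i; simp [gcRun]
  | cons c cs ih =>
    intro i
    by_cases h : c = ' '
    · simp [gcRun, h]
    · simp only [gcRun, if_neg h]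
      exact le_trans (ih (i + 1)) (Nat.le_succ _)

-- outer while loop over the character index i
def gcScan (cs : List Char) (i : Int) (leftAligned : Bool) (cols : List Int) : List Int :=
  match cs with
  | [] => cols
  | c :: rest =>
    if c = ' ' then gcScan rest (i + 1) leftAligned cols
    else
      let r := gcRun rest (i + 1)
      let cols' := if leftAligned then (if i ≠ 0 then cols ++ [i] else cols) else cols ++ [r.2 + 1]
      gcScan r.1 r.2 leftAligned cols'
  termination_by cs.length
  decreasing_by
  · simp
  · exact Nat.lt_succ_of_le (gcRun_fst_length rest (i + 1))

def guessColumns_alt (header : String) (firstLine : String) : List Int :=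
  let cs := header.toList
  let leftAligned := match cs with | [] => false | c :: _ => !(c == ' ')   -- header[:1] not in ('', ' ')
  gcScan cs 0 leftAligned [0]

-- ===== PRECONDITION & SPEC =====
def Spec_guessColumns (header : String) (firstLine : String) (out : List Int) : Prop := out = guessColumns_alt header firstLine
instance (header : String) (firstLine : String) (out : List Int) : Decidable (Spec_guessColumns header firstLine out) := by unfold Spec_guessColumns; infer_instance

-- ===== CLAIM (what is proved, stated in full; the proofs are below) =====
def Claim_equal_guessColumns : Prop := ∀ (header : String) (firstLine : String), Dom_guessColumns header firstLine → Spec_guessColumns header firstLine (guessColumns header firstLine)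

-- ===== LEMMAS AND PROOFS =====

def notSp (c : Char) : Bool := !(c == ' ')

-- reference form of Python's split(' ')
def spSplit : List Char → List (List Char)
  | [] => [[]]
  | c :: cs => if c = ' ' then [] :: spSplit cs else List.modifyHead (c :: ·) (spSplit cs)

theorem spSplit_ne_nil : ∀ cs, spSplit cs ≠ [] := by
  intro cs; induction cs with
  | nil => simp [spSplit]
  | cons c cs ih =>
    by_cases h : c = ' ' <;> simp [spSplit, h]
    cases hs : spSplit cs with
    | nil => exact absurd hs ih
    | cons a t => simp

theorem splitOn_go_eq : ∀ (fuel : Nat) (l cur : List Char) (acc : List (List Char)), l.length ≤ fuel →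
    PySem.Chars.splitOn.go [' '] fuel l cur acc
      = acc.reverse ++ List.modifyHead (cur.reverse ++ ·) (spSplit l) := by
  intro fuel
  induction fuel with
  | zero =>
    intro l cur acc h
    have : l = [] := List.eq_nil_of_length_eq_zero (Nat.le_zero.mp h)
    subst this
    simp [PySem.Chars.splitOn.go, spSplit]
  | succ fuel ih =>
    intro l cur acc h
    cases l with
    | nil => simp [PySem.Chars.splitOn.go, spSplit]
    | cons c rest =>
      by_cases hc : c = ' '
      · subst hc
        have : [' '].isPrefixOf (' ' :: rest) = true := by simp [List.isPrefixOf]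
        rw [PySem.Chars.splitOn.go]
        simp only [this, if_pos]
        simp only [List.length_cons, List.length_nil, List.drop_succ_cons, List.drop_zero]
        rw [ih rest [] (cur.reverse :: acc) (by simpa using Nat.le_of_succ_le_succ h)]
        simp [spSplit, List.modifyHead]
        cases spSplit rest <;> simp
      · have hpre : [' '].isPrefixOf (c :: rest) = false := by
          simp [List.isPrefixOf]; exact fun hh => hc hh.symm
        rw [PySem.Chars.splitOn.go]
        simp only [hpre, if_neg, Bool.false_eq_true, not_false_iff]
        rw [ih rest (c :: cur) acc (Nat.le_of_succ_le_succ h)]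
        cases hs : spSplit rest with
        | nil => exact absurd hs (spSplit_ne_nil rest)
        | cons a t => simp [spSplit, hc, hs, List.modifyHead]

theorem splitOn_eq_spSplit (cs : List Char) : PySem.Chars.splitOn cs [' '] = spSplit cs := by
  rw [PySem.Chars.splitOn, splitOn_go_eq (cs.length + 1) cs [] [] (by omega)]
  cases hs : spSplit cs <;> simp

theorem gcRun_eq : ∀ (cs : List Char) (i : Int),
    gcRun cs i = (cs.dropWhile notSp, i + ((cs.takeWhile notSp).length : Int)) := by
  intro cs
  induction cs with
  | nil => intro i; simp [gcRun]
  | cons c cs ih =>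
    intro i
    by_cases h : c = ' '
    · simp [gcRun, h, notSp]
    · simp [gcRun, h, notSp, ih]
      ring

theorem spSplit_run (cs : List Char) :
    spSplit cs = cs.takeWhile notSp ::
      (match cs.dropWhile notSp with
       | [] => []
       | _ :: r => spSplit r) := by
  induction cs with
  | nil => simp [spSplit]
  | cons c cs ih =>
    by_cases h : c = ' '
    · simp [spSplit, h, notSp]
    · simp [spSplit, h, notSp, ih, List.modifyHead]

theorem dropWhile_head_space : ∀ (l : List Char) (x : Char) (xs : List Char),
    l.dropWhile notSp = x :: xs → x = ' ' := by
  intro l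
  induction l with
  | nil => intro x xs h; simp [List.dropWhile] at h
  | cons c cs ih =>
    intro x xs h
    by_cases hc : c = ' '
    · rw [List.dropWhile_cons] at h
      simp [notSp, hc] at h
      exact h.1.symm
    · rw [List.dropWhile_cons] at h
      simp [notSp, hc] at h
      exact ih x xs h

theorem main_loop_eq : ∀ (n : Nat) (cs : List Char), cs.length ≤ n → ∀ (la : Bool) (i : Int) (cols : List Int),
    gcLoopA (spSplit cs) la i cols = gcScan cs i la cols := by
  intro n
  induction n with
  | zero =>
    intro cs h la i cols
    have : cs = [] := List.eq_nil_of_length_eq_zero (Nat.le_zero.mp h)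
    subst this
    simp [spSplit, gcLoopA, gcScan]
  | succ n ih =>
    intro cs h la i cols
    cases cs with
    | nil => simp [spSplit, gcLoopA, gcScan]
    | cons c rest =>
      by_cases hc : c = ' '
      · subst hc
        rw [show spSplit (' ' :: rest) = [] :: spSplit rest by simp [spSplit]]
        rw [gcScan]
        simp only [gcLoopA, List.length_nil, Nat.lt_irrefl]
        exact ih rest (Nat.le_of_succ_le_succ h) la (i + 1) cols
      · have hnot : notSp c = true := by simp [notSp, hc]
        rw [spSplit_run (c :: rest), List.takeWhile_cons, List.dropWhile_cons, if_pos hnot, if_pos hnot]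
        rw [gcScan]
        rw [if_neg hc]
        simp only [gcRun_eq]
        rw [gcLoopA]
        rw [if_pos (by simp : 0 < (c :: rest.takeWhile notSp).length)]
        have hlen : ((c :: rest.takeWhile notSp).length : Int) = 1 + ((rest.takeWhile notSp).length : Int) := by
          simp; ring
        have hcols : (if !la then cols ++ [i + ((c :: rest.takeWhile notSp).length : Int) + 1]
                      else if i ≠ 0 then cols ++ [i] else cols)
                   = (if la then (if i ≠ 0 then cols ++ [i] else cols) else cols ++ [(i + 1 + ((rest.takeWhile notSp).length : Int)) + 1]) := by
          cases la
          · simp; ring_nf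
          · simp
        rw [hcols]
        have hidx : i + ((c :: rest.takeWhile notSp).length : Int) + 1 = i + 1 + ((rest.takeWhile notSp).length : Int) + 1 := by
          rw [hlen]; ring
        rw [hidx]
        set cols' := (if la then (if i ≠ 0 then cols ++ [i] else cols) else cols ++ [(i + 1 + ((rest.takeWhile notSp).length : Int)) + 1]) with hcols'
        cases hdweq : rest.dropWhile notSp with
        | nil => rw [gcScan]; rfl
        | cons d r =>
          have hd : d = ' ' := dropWhile_head_space rest d r hdweq
          subst hd
          rw [gcScan, if_pos rfl]
          have hlenr : r.length ≤ n := by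
            have h1 := List.length_dropWhile_le notSp rest
            rw [hdweq] at h1
            simp at h1
            have h2 : rest.length ≤ n := Nat.le_of_succ_le_succ h
            omega
          rw [ih r hlenr la (i + 1 + ((rest.takeWhile notSp).length : Int) + 1) cols']

-- ===== VERDICT (by name: the statement is the Claim_ definition above) =====
theorem guessColumns_spec : Claim_equal_guessColumns := by
  unfold Claim_equal_guessColumns Spec_guessColumns
  intro header firstLine _
  show guessColumns header firstLine = guessColumns_alt header firstLine
  unfold guessColumns guessColumns_alt
  rw [splitOn_eq_spSplit]
  cases hcs : header.toList with
  | nil =>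
    simp [spSplit, PySem.List.pyGetD_zero_cons, gcLoopA, gcScan]
  | cons c rest =>
    have hla : (!(PySem.List.pyGetD (spSplit (c :: rest)) 0 [] == ([] : List Char))) = !(c == ' ') := by
      rw [spSplit_run (c :: rest), List.takeWhile_cons]
      by_cases hc : c = ' '
      · simp [notSp, hc, PySem.List.pyGetD_zero_cons]
      · simp [notSp, hc, PySem.List.pyGetD_zero_cons]
    show gcLoopA (spSplit (c :: rest)) (!(PySem.List.pyGetD (spSplit (c :: rest)) 0 [] == ([] : List Char))) 0 [0]
        = gcScan (c :: rest) 0 (!(c == ' ')) [0]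
    rw [hla]
    exact main_loop_eq (c :: rest).length (c :: rest) le_rfl (!(c == ' ')) 0 [0]
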